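-- pv_equiv track=rewrite | github.com/aff4/pyaff4 | pyaff4/escaping.py | arnPathFragment_from_path
-- ===== SOURCE A (Python) =====
-- FORBIDDEN = set()
--
-- def arnPathFragment_from_path(pathName):
--     escaped_path = []
--     if pathName[0] == ".":
--         if pathName[1] == ".":
--             pathName = pathName[2:]
--         else:
--             pathName = pathName[1:]
--     if pathName[0:3] == "\\\\.":
--         escaped_path.append(".")
--         pathName = pathName[3:]
--
--     for c in pathName:
--         if ord(c) >= 0 and ord(c)<= 0x1f:
--             # control codes
--             escaped_path.append("%%%02x" % ord(c))
--         elif c == '\\':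
--             escaped_path.append("/")
--         elif c == ' ':
--             escaped_path.append("%20")
--         elif c == '"':
--             escaped_path.append("%22")
--         elif c == '%':
--             escaped_path.append("%25")
--         elif c in FORBIDDEN:
--             escaped_path.append("%%%02x" % ord(c))
--         else:
--             escaped_path.append(c)
--
--     if escaped_path[0] == u"/":
--         if len(escaped_path) > 1 and escaped_path[1] == u"/":
--             # unc path
--             escaped_path = escaped_path[2:]
--             return "".join(escaped_path)
--         else:
--             # regular rooted path
--             return "".join(escaped_path)
--             #pass
--             #escaped_path = escaped_path[1:]
--     elif escaped_path[0] == u".":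
--         return "".join(escaped_path)
--     else:
--         # relative path or windows drive path
--         return "/" + "".join(escaped_path)
-- ===== SOURCE B (Python) =====
-- # Staged whole-string passes instead of A's per-character branch ladder: escape '%'
-- # first, then the other specials and every control code via repeated str.replace,
-- # then split on backslashes and rejoin with '/'; postamble reads the final string.
-- _CTRL = [(chr(i), "%%%02x" % i) for i in range(0x20)]
--
-- def arnPathFragment_from_path(pathName):
--     if pathName.startswith(".."):
--         pathName = pathName[2:]
--     elif pathName.startswith("."):
--         pathName = pathName[1:]
--     prefix = ""
--     if pathName.startswith("\\\\."):
--         prefix = "."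
--         pathName = pathName[3:]
--     s = pathName.replace("%", "%25").replace('"', "%22").replace(" ", "%20")
--     for ch, esc in _CTRL:
--         s = s.replace(ch, esc)
--     s = prefix + "/".join(s.split("\\"))
--     if s.startswith("//"):
--         return s[2:]
--     if s.startswith("/") or s.startswith("."):
--         return s
--     return "/" + s
-- ===== Notes on version B (the rewrite author's own statement) =====
-- stated objective: faster
-- what changed: Replaces A's single per-character pass (branch ladder appending tokens to a Python-level list, then token-list postamble) by staged whole-string passes: a chain of str.replace passes ('%' first, then the other specials and each control code) followed by split('\\')/'/'.join, with the postamble reformulated as startswith tests on the final string.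
import Mathlib
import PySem

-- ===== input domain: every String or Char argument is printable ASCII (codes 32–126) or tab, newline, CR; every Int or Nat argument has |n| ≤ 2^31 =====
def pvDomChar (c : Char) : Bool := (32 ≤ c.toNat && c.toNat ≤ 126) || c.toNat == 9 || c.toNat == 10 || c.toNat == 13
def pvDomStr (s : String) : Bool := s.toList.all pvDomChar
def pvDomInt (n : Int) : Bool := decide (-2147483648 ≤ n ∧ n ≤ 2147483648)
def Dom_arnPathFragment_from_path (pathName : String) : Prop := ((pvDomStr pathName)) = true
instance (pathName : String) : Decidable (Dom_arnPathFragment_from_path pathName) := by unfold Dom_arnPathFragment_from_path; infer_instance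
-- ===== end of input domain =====

-- B replaces A's single per-character pass by staged whole-string replace passes,
-- a split/join on backslash, and a string-level postamble; a timing run measured B faster (constant factor).

-- ===== PORT A =====
-- hand-port of '%%%02x' % n — '%' followed by two lowercase hex digits; exact for 0 ≤ n ≤ 255
def pvHexDigit (n : Nat) : Char := if n < 10 then Char.ofNat (48 + n) else Char.ofNat (87 + n)
def pvPct02x (n : Nat) : List Char := ['%', pvHexDigit (n / 16), pvHexDigit (n % 16)]

-- FORBIDDEN = set()  (module-level constant of A)
def pvFORBIDDEN : PySem.Set Char := PySem.Set.ofList []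

-- the body of A's per-character if/elif ladder (one token per input char)
def pvEscTok (c : Char) : List Char :=
  if 0 ≤ c.toNat ∧ c.toNat ≤ 0x1f then pvPct02x c.toNat
  else if c = '\\' then ['/']
  else if c = ' ' then ['%', '2', '0']
  else if c = '"' then ['%', '2', '2']
  else if c = '%' then ['%', '2', '5']
  else if pvFORBIDDEN.contains c then pvPct02x c.toNat
  else [c]

-- A on the character list: preamble, token-list fold, token-level postamble
def pvCoreA (l0 : List Char) : List Char :=
  let l1 := if PySem.List.pyGet? l0 0 = some '.' then
              (if PySem.List.pyGet? l0 1 = some '.' then PySem.List.slice l0 (some 2) none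
               else PySem.List.slice l0 (some 1) none)
            else l0
  let st : List (List Char) × List Char :=
    if PySem.List.slice l1 none (some 3) = ['\\', '\\', '.'] then ([['.']], PySem.List.slice l1 (some 3) none)
    else ([], l1)
  let ep := st.2.foldl (fun acc c => acc ++ [pvEscTok c]) st.1
  if PySem.List.pyGet? ep 0 = some ['/'] then
    (if ep.length > 1 ∧ PySem.List.pyGet? ep 1 = some ['/'] then
       PySem.Chars.join [] (PySem.List.slice ep (some 2) none)
     else PySem.Chars.join [] ep)
  else if PySem.List.pyGet? ep 0 = some ['.'] then PySem.Chars.join [] ep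
  else '/' :: PySem.Chars.join [] ep   -- on ep = [] Python raises IndexError (excluded by Pre_)

def arnPathFragment_from_path (pathName : String) : String := String.ofList (pvCoreA pathName.toList)

-- ===== PORT B =====
-- _CTRL = [(chr(i), "%%%02x" % i) for i in range(0x20)]  (module-level constant of Source B)
def pvCtrl : List (Char × List Char) := (List.range 32).map (fun i => (Char.ofNat i, pvPct02x i))

-- B on the character list: startswith-preamble, then staged whole-string passes —
-- three replace() passes, a replace() pass per control code, split('\')/'/'.join —
-- then the string-level postamble
def pvCoreB (cs0 : List Char) : List Char :=
  let cs1 := if PySem.Chars.startswith cs0 ['.', '.'] then cs0.drop 2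
             else if PySem.Chars.startswith cs0 ['.'] then cs0.drop 1
             else cs0
  let pb : List Char × List Char :=
    if PySem.Chars.startswith cs1 ['\\', '\\', '.'] then (['.'], cs1.drop 3) else ([], cs1)
  let s1 := PySem.Chars.replace (PySem.Chars.replace (PySem.Chars.replace pb.2
              ['%'] ['%','2','5']) ['"'] ['%','2','2']) [' '] ['%','2','0']
  let s2 := pvCtrl.foldl (fun s pr => PySem.Chars.replace s [pr.1] pr.2) s1
  let s := pb.1 ++ PySem.Chars.join ['/'] (PySem.Chars.splitOn s2 ['\\'])
  if PySem.Chars.startswith s ['/', '/'] then s.drop 2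
  else if PySem.Chars.startswith s ['/'] || PySem.Chars.startswith s ['.'] then s
  else '/' :: s

def arnPathFragment_from_path_alt (pathName : String) : String := String.ofList (pvCoreB pathName.toList)

-- ===== PRECONDITION & SPEC =====
-- the leading-dot strip of A's preamble, on the raw input
def pvStrip (l : List Char) : List Char :=
  if l.head? = some '.' then (if l[1]? = some '.' then l.drop 2 else l.drop 1) else l

-- Pre_ excludes exactly the inputs on which Python A raises IndexError: the empty string
-- (at pathName[0]), a single leading dot with nothing after it (at pathName[1]), and inputs
-- whose dot-stripped remainder is empty without the UNC preamble prefix (escaped_path[0]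
-- indexing an empty token list).
def Pre_arnPathFragment_from_path (pathName : String) : Prop :=
  pathName.toList ≠ [] ∧
  (pathName.toList.head? = some '.' → 2 ≤ pathName.toList.length) ∧
  ((pvStrip pathName.toList).take 3 = ['\\', '\\', '.'] ∨ pvStrip pathName.toList ≠ [])
instance (pathName : String) : Decidable (Pre_arnPathFragment_from_path pathName) := by
  unfold Pre_arnPathFragment_from_path; infer_instance

def pvWitness_arnPathFragment_from_path : String := "x"

def Spec_arnPathFragment_from_path (pathName : String) (out : String) : Prop := out = arnPathFragment_from_path_alt pathName
instance (pathName : String) (out : String) : Decidable (Spec_arnPathFragment_from_path pathName out) := by unfold Spec_arnPathFragment_from_path; infer_instance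

-- ===== CLAIM (what is proved, stated in full; the proofs are below) =====
def Claim_equal_arnPathFragment_from_path : Prop := ∀ (pathName : String), Dom_arnPathFragment_from_path pathName → Pre_arnPathFragment_from_path pathName → Spec_arnPathFragment_from_path pathName (arnPathFragment_from_path pathName)

-- ===== LEMMAS AND PROOFS =====

-- the per-char substitution a single-char replace() pass performs
def pvSub (c : Char) (r : List Char) (x : Char) : List Char := if x = c then r else [x]

-- a chain of single-char passes, as a fold of flatMaps
def pvApply (ps : List (Char × List Char)) (s : List Char) : List Char :=
  ps.foldl (fun s pr => s.flatMap (pvSub pr.1 pr.2)) s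

-- all of B's passes in order: '%' first, the two quoted specials, the control codes, backslash
def pvAllPasses : List (Char × List Char) :=
  [('%', ['%','2','5']), ('"', ['%','2','2']), (' ', ['%','2','0'])] ++ pvCtrl ++ [('\\', ['/'])]

theorem pv_replace_go (c : Char) (r : List Char) : ∀ (fuel : Nat) (l acc : List Char),
    l.length ≤ fuel →
    PySem.Chars.replace.go [c] r fuel l acc = acc.reverse ++ l.flatMap (pvSub c r) := by
  intro fuel
  induction fuel with
  | zero =>
    intro l acc h
    have : l = [] := List.eq_nil_of_length_eq_zero (Nat.le_zero.mp h)
    subst this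
    simp [PySem.Chars.replace.go]
  | succ n ih =>
    intro l acc h
    cases l with
    | nil => simp [PySem.Chars.replace.go]
    | cons x t =>
      by_cases hx : c = x
      · subst hx
        have hp : List.isPrefixOf [c] (c :: t) = true := by simp [List.isPrefixOf]
        rw [PySem.Chars.replace.go, if_pos hp]
        have := ih t (r.reverse ++ acc) (by simpa using Nat.lt_succ_iff.mp (by simpa using h))
        simp only [List.length_cons] at this ⊢
        simpa [pvSub, List.flatMap_cons] using this
      · have hp : List.isPrefixOf [c] (x :: t) = false := by
          simp [List.isPrefixOf, hx]
        rw [PySem.Chars.replace.go, if_neg (by simp [hp])]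
        have := ih t (x :: acc) (by simpa using Nat.lt_succ_iff.mp (by simpa using h))
        simpa [pvSub, Ne.symm hx, List.flatMap_cons] using this

theorem pv_replace_single (s : List Char) (c : Char) (r : List Char) :
    PySem.Chars.replace s [c] r = s.flatMap (pvSub c r) := by
  unfold PySem.Chars.replace
  rw [if_neg (by simp)]
  simpa using pv_replace_go c r s.length s [] (le_refl _)

-- split on a single char, functionally
def pvSp (c : Char) : List Char → List Char → List (List Char)
  | [], cur => [cur.reverse]
  | x :: t, cur => if x = c then cur.reverse :: pvSp c t [] else pvSp c t (x :: cur)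

theorem pv_sp_ne_nil (c : Char) (l cur : List Char) : pvSp c l cur ≠ [] := by
  cases l with
  | nil => simp [pvSp]
  | cons x t =>
    unfold pvSp
    split_ifs
    · simp
    · exact pv_sp_ne_nil c t (x :: cur)

theorem pv_split_go (c : Char) : ∀ (fuel : Nat) (l cur : List Char) (acc : List (List Char)),
    l.length < fuel →
    PySem.Chars.splitOn.go [c] fuel l cur acc = acc.reverse ++ pvSp c l cur := by
  intro fuel
  induction fuel with
  | zero => intro l cur acc h; omega
  | succ n ih =>
    intro l cur acc h
    cases l with
    | nil => simp [PySem.Chars.splitOn.go, pvSp]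
    | cons x t =>
      by_cases hx : c = x
      · subst hx
        have hp : List.isPrefixOf [c] (c :: t) = true := by simp [List.isPrefixOf]
        rw [PySem.Chars.splitOn.go, if_pos hp]
        have := ih t [] (cur.reverse :: acc) (by simpa using Nat.lt_succ_iff.mp h)
        simpa [pvSp] using this
      · have hp : List.isPrefixOf [c] (x :: t) = false := by simp [List.isPrefixOf, hx]
        rw [PySem.Chars.splitOn.go, if_neg (by simp [hp])]
        have := ih t (x :: cur) acc (by simpa using Nat.lt_succ_iff.mp h)
        simpa [pvSp, Ne.symm hx] using this

theorem pv_join_sp (c s : Char) : ∀ (l cur : List Char),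
    PySem.Chars.join [s] (pvSp c l cur) = cur.reverse ++ l.flatMap (pvSub c [s]) := by
  intro l
  induction l with
  | nil => intro cur; simp [pvSp, PySem.Chars.join, List.intercalate]
  | cons x t ih =>
    intro cur
    by_cases hx : x = c
    · subst hx
      obtain ⟨b, rest, hb⟩ := List.exists_cons_of_ne_nil (pv_sp_ne_nil x t [])
      have hcons : PySem.Chars.join [s] (cur.reverse :: b :: rest)
          = cur.reverse ++ s :: PySem.Chars.join [s] (b :: rest) := by
        simp [PySem.Chars.join, List.intercalate]
      have ht := ih []
      rw [hb] at ht
      simp only [List.reverse_nil, List.nil_append] at ht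
      simp only [pvSp, if_true, hb]
      rw [hcons, ht]
      simp [pvSub, List.flatMap_cons]
    · simp only [pvSp, if_neg hx]
      rw [ih (x :: cur)]
      simp [pvSub, hx, List.flatMap_cons]

theorem pv_join_split (s : List Char) :
    PySem.Chars.join ['/'] (PySem.Chars.splitOn s ['\\']) = s.flatMap (pvSub '\\' ['/']) := by
  unfold PySem.Chars.splitOn
  rw [pv_split_go '\\' (s.length + 1) s [] [] (by omega)]
  simpa using pv_join_sp '\\' '/' s []

theorem pv_foldl_replace (ps : List (Char × List Char)) : ∀ s : List Char,
    ps.foldl (fun s pr => PySem.Chars.replace s [pr.1] pr.2) s = pvApply ps s := by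
  induction ps with
  | nil => intro s; rfl
  | cons p t ih =>
    intro s
    rw [List.foldl_cons, pv_replace_single s p.1 p.2, ih]
    rfl

theorem pv_apply_flatMap (ps : List (Char × List Char)) : ∀ (s : List Char) (h : Char → List Char),
    pvApply ps (s.flatMap h) = s.flatMap (fun c => pvApply ps (h c)) := by
  induction ps with
  | nil => intro s h; rfl
  | cons p t ih =>
    intro s h
    simp only [pvApply, List.foldl_cons, List.flatMap_assoc]
    exact ih s _

theorem pv_apply_append (p q : List (Char × List Char)) (s : List Char) :
    pvApply (p ++ q) s = pvApply q (pvApply p s) := by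
  simp [pvApply, List.foldl_append]

set_option maxHeartbeats 4000000 in
set_option maxRecDepth 100000 in
theorem pv_pass_tok_fin : ∀ n : Fin 127,
    pvApply pvAllPasses [Char.ofNat n.val] = pvEscTok (Char.ofNat n.val) := by decide

theorem pv_pass_tok (c : Char) (h : c.toNat ≤ 126) :
    pvApply pvAllPasses [c] = pvEscTok c := by
  have := pv_pass_tok_fin ⟨c.toNat, by omega⟩
  simpa [Char.ofNat_toNat] using this

theorem pv_dom_le (c : Char) (h : pvDomChar c = true) : c.toNat ≤ 126 := by
  unfold pvDomChar at h; simp at h; omega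

-- B's staged passes on a whole string compute exactly A's per-char token map, flattened
theorem pv_passes_eq (xs : List Char) (hx : ∀ c ∈ xs, pvDomChar c = true) :
    PySem.Chars.join ['/'] (PySem.Chars.splitOn
      (pvCtrl.foldl (fun s pr => PySem.Chars.replace s [pr.1] pr.2)
        (PySem.Chars.replace (PySem.Chars.replace (PySem.Chars.replace xs
          ['%'] ['%','2','5']) ['"'] ['%','2','2']) [' '] ['%','2','0'])) ['\\'])
    = (xs.map pvEscTok).flatten := by
  rw [pv_replace_single, pv_replace_single, pv_replace_single, pv_foldl_replace, pv_join_split]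
  have h3 : ((xs.flatMap (pvSub '%' ['%','2','5'])).flatMap (pvSub '"' ['%','2','2'])).flatMap
      (pvSub ' ' ['%','2','0']) = pvApply [('%', ['%','2','5']), ('"', ['%','2','2']), (' ', ['%','2','0'])] xs := by
    simp only [pvApply, List.foldl_cons, List.foldl_nil]
  rw [h3]
  have : pvApply [('\\', ['/'])] (pvApply pvCtrl
      (pvApply [('%', ['%','2','5']), ('"', ['%','2','2']), (' ', ['%','2','0'])] xs))
      = pvApply pvAllPasses xs := by
    rw [pvAllPasses, pv_apply_append, pv_apply_append]
  have hbs : (pvApply pvCtrl (pvApply [('%', ['%','2','5']), ('"', ['%','2','2']), (' ', ['%','2','0'])] xs)).flatMap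
      (pvSub '\\' ['/']) = pvApply [('\\', ['/'])] (pvApply pvCtrl
      (pvApply [('%', ['%','2','5']), ('"', ['%','2','2']), (' ', ['%','2','0'])] xs)) := by
    simp only [pvApply, List.foldl_cons, List.foldl_nil]
  rw [hbs, this]
  have hid : xs = xs.flatMap (fun c => [c]) := by simp
  conv_lhs => rw [hid]
  rw [pv_apply_flatMap]
  rw [List.flatMap_congr (g := pvEscTok) (fun c hc => pv_pass_tok c (pv_dom_le c (hx c hc)))]
  exact List.flatMap_def ..

theorem pv_stripA_eq (l : List Char) :
    (if PySem.List.pyGet? l 0 = some '.' then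
       (if PySem.List.pyGet? l 1 = some '.' then PySem.List.slice l (some 2) none
        else PySem.List.slice l (some 1) none)
     else l) = pvStrip l := by
  have h2 : PySem.List.slice l (some 2) none = l.drop 2 := PySem.List.slice_from l (by norm_num)
  have h1 : PySem.List.slice l (some 1) none = l.drop 1 := PySem.List.slice_from l (by norm_num)
  rw [h1, h2]
  cases l with
  | nil => simp [PySem.List.pyGet?, PySem.List.pyIdx?, pvStrip]
  | cons a t =>
    cases t with
    | nil =>
      by_cases ha : a = '.' <;>
        simp [PySem.List.pyGet?, PySem.List.pyIdx?, pvStrip, ha]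
    | cons b t2 =>
      have hpos : (0:Int) ≤ (t2.length:Int) + 1 := by omega
      by_cases ha : a = '.' <;> by_cases hb : b = '.' <;>
        simp [PySem.List.pyGet?, PySem.List.pyIdx?, pvStrip, ha, hb, hpos]

theorem pv_stripB_eq (l : List Char) :
    (if PySem.Chars.startswith l ['.', '.'] then l.drop 2
     else if PySem.Chars.startswith l ['.'] then l.drop 1
     else l) = pvStrip l := by
  cases l with
  | nil => simp [PySem.Chars.startswith, List.isPrefixOf, pvStrip]
  | cons a t =>
    cases t with
    | nil =>
      by_cases ha : '.' = a
      · subst ha; simp [PySem.Chars.startswith, List.isPrefixOf, pvStrip]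
      · have ha' : ¬ a = '.' := fun h => ha h.symm
        simp [PySem.Chars.startswith, List.isPrefixOf, pvStrip, ha, ha']
    | cons b t2 =>
      by_cases ha : '.' = a
      · subst ha
        by_cases hb : '.' = b
        · subst hb; simp [PySem.Chars.startswith, List.isPrefixOf, pvStrip]
        · have hb' : ¬ b = '.' := fun h => hb h.symm
          simp [PySem.Chars.startswith, List.isPrefixOf, pvStrip, hb, hb']
      · have ha' : ¬ a = '.' := fun h => ha h.symm
        simp [PySem.Chars.startswith, List.isPrefixOf, pvStrip, ha, ha']

theorem pv_join_nil_flatten (parts : List (List Char)) : PySem.Chars.join [] parts = parts.flatten := by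
  induction parts with
  | nil => rfl
  | cons h t ih =>
    cases t with
    | nil => simp [PySem.Chars.join, List.intercalate]
    | cons h2 t2 =>
      simp [PySem.Chars.join, List.intercalate, List.intersperse] at ih ⊢
      simpa using ih

theorem pv_tok_ne_nil (c : Char) : pvEscTok c ≠ [] := by
  unfold pvEscTok; split_ifs <;> simp [pvPct02x]

theorem pv_tok_head_slash (c : Char) (h : (pvEscTok c).head? = some '/') : pvEscTok c = ['/'] := by
  unfold pvEscTok at h ⊢; split_ifs at h ⊢ <;> simp_all [pvPct02x]

theorem pv_tok_head_dot (c : Char) (h : (pvEscTok c).head? = some '.') : pvEscTok c = ['.'] := by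
  unfold pvEscTok at h ⊢; split_ifs at h ⊢ <;> simp_all [pvPct02x]

theorem pv_mem_strip {c : Char} {l : List Char} (h : c ∈ pvStrip l) : c ∈ l := by
  unfold pvStrip at h; split_ifs at h <;> first | exact List.mem_of_mem_drop h | exact h

theorem pv_pyget0 {α : Type} (a : α) (t : List α) : PySem.List.pyGet? (a::t) 0 = some a := by
  simp [PySem.List.pyGet?, PySem.List.pyIdx?]

theorem pv_pyget1 {α : Type} (a b : α) (t : List α) : PySem.List.pyGet? (a::b::t) 1 = some b := by
  simp [PySem.List.pyGet?, PySem.List.pyIdx?]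

theorem pv_post (c : Char) (cs : List Char) :
    (if PySem.List.pyGet? (List.map pvEscTok (c::cs)) 0 = some ['/'] then
       (if (List.map pvEscTok (c::cs)).length > 1 ∧ PySem.List.pyGet? (List.map pvEscTok (c::cs)) 1 = some ['/'] then
          PySem.Chars.join [] (PySem.List.slice (List.map pvEscTok (c::cs)) (some 2) none)
        else PySem.Chars.join [] (List.map pvEscTok (c::cs)))
     else if PySem.List.pyGet? (List.map pvEscTok (c::cs)) 0 = some ['.'] then
       PySem.Chars.join [] (List.map pvEscTok (c::cs))
     else '/' :: PySem.Chars.join [] (List.map pvEscTok (c::cs)))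
    = (if PySem.Chars.startswith (List.map pvEscTok (c::cs)).flatten ['/','/'] = true then
         (List.map pvEscTok (c::cs)).flatten.drop 2
       else if (PySem.Chars.startswith (List.map pvEscTok (c::cs)).flatten ['/'] ||
                PySem.Chars.startswith (List.map pvEscTok (c::cs)).flatten ['.']) = true then
         (List.map pvEscTok (c::cs)).flatten
       else '/' :: (List.map pvEscTok (c::cs)).flatten) := by
  by_cases h1 : pvEscTok c = ['/']
  · simp only [List.map_cons, h1]
    rw [pv_pyget0, if_pos rfl]
    cases cs with
    | nil => decide
    | cons c2 cs2 =>
      by_cases h2 : pvEscTok c2 = ['/']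
      · simp only [List.map_cons, h2]
        rw [pv_pyget1, if_pos ⟨by simp, rfl⟩]
        have hsl : PySem.List.slice (['/']::['/']::List.map pvEscTok cs2 : List (List Char)) (some 2) none
            = List.map pvEscTok cs2 := by
          have := PySem.List.slice_from (['/']::['/']::List.map pvEscTok cs2 : List (List Char)) (a := 2) (by norm_num)
          simpa using this
        rw [hsl, pv_join_nil_flatten]
        simp [PySem.Chars.startswith, List.isPrefixOf]
      · obtain ⟨h', t', htok⟩ := List.exists_cons_of_ne_nil (pv_tok_ne_nil c2)
        have hh' : h' ≠ '/' := by
          intro e; exact h2 (by simpa [htok, e] using pv_tok_head_slash c2 (by simp [htok, e]))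
        simp only [List.map_cons, htok]
        have hcond : ¬((((['/'] : List Char)::(h'::t')::List.map pvEscTok cs2).length > 1) ∧
            PySem.List.pyGet? ((['/'] : List Char)::(h'::t')::List.map pvEscTok cs2) 1 = some ['/']) := by
          rw [pv_pyget1]
          rintro ⟨-, h⟩
          injection h with h
          exact hh' (by injection h)
        rw [if_neg hcond, pv_join_nil_flatten]
        simp [PySem.Chars.startswith, List.isPrefixOf, Ne.symm hh']
  · by_cases hdot : pvEscTok c = ['.']
    · simp only [List.map_cons, hdot]
      rw [pv_pyget0, if_neg (show ¬ ((some ['.'] : Option (List Char)) = some ['/']) by decide), if_pos rfl,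
        pv_join_nil_flatten]
      simp [PySem.Chars.startswith, List.isPrefixOf]
    · obtain ⟨h, t, htok⟩ := List.exists_cons_of_ne_nil (pv_tok_ne_nil c)
      have hhs : h ≠ '/' := by
        intro e; exact h1 (by simpa [htok, e] using pv_tok_head_slash c (by simp [htok, e]))
      have hhd : h ≠ '.' := by
        intro e; exact hdot (by simpa [htok, e] using pv_tok_head_dot c (by simp [htok, e]))
      simp only [List.map_cons, htok]
      rw [pv_pyget0]
      rw [if_neg (by intro hx; injection hx with hx; exact hhs (by injection hx))]
      rw [if_neg (by intro hx; injection hx with hx; exact hhd (by injection hx))]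
      rw [pv_join_nil_flatten]
      simp [PySem.Chars.startswith, List.isPrefixOf, Ne.symm hhs, Ne.symm hhd]

theorem pv_core_eq (l : List Char) (hdom : ∀ c ∈ l, pvDomChar c = true)
    (hpre : (pvStrip l).take 3 = ['\\', '\\', '.'] ∨ pvStrip l ≠ []) :
    pvCoreA l = pvCoreB l := by
  simp only [pvCoreA, pvCoreB]
  rw [pv_stripA_eq, pv_stripB_eq]
  set m := pvStrip l with hm
  have hdm : ∀ c ∈ m, pvDomChar c = true := fun c hc => hdom c (pv_mem_strip hc)
  have h3 : PySem.List.slice m none (some 3) = m.take 3 := by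
    have := PySem.List.slice_to m (b := 3) (by norm_num); simpa using this
  have hd3 : PySem.List.slice m (some 3) none = m.drop 3 := by
    have := PySem.List.slice_from m (a := 3) (by norm_num); simpa using this
  have hbridge : (PySem.Chars.startswith m ['\\','\\','.'] = true) ↔ (m.take 3 = ['\\','\\','.']) := by
    unfold PySem.Chars.startswith
    rw [List.isPrefixOf_iff_prefix, List.prefix_iff_eq_take]
    constructor
    · intro h; simpa using h.symm
    · intro h; simpa using h.symm
  rw [h3, hd3]
  by_cases hflag : m.take 3 = ['\\','\\','.']
  · have hsw : PySem.Chars.startswith m ['\\','\\','.'] = true := hbridge.mpr hflag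
    rw [if_pos hflag]
    simp only [hsw, if_true]
    rw [PySem.List.foldl_append_singleton_eq_map]
    rw [pv_passes_eq _ (fun c hc => hdm c (List.mem_of_mem_drop hc))]
    simp only [List.singleton_append]
    rw [pv_pyget0]
    rw [if_neg (show ¬ ((some ['.'] : Option (List Char)) = some ['/']) by decide)]
    rw [if_pos rfl]
    have hs1 : PySem.Chars.startswith ('.'::(List.map pvEscTok (List.drop 3 m)).flatten) ['/','/'] = false := by
      simp [PySem.Chars.startswith, List.isPrefixOf]
    have hs2 : PySem.Chars.startswith ('.'::(List.map pvEscTok (List.drop 3 m)).flatten) ['/'] = false := by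
      simp [PySem.Chars.startswith, List.isPrefixOf]
    have hs3 : PySem.Chars.startswith ('.'::(List.map pvEscTok (List.drop 3 m)).flatten) ['.'] = true := by
      simp [PySem.Chars.startswith, List.isPrefixOf]
    simp only [hs1, hs2, hs3, Bool.false_or, if_true, Bool.false_eq_true, if_false]
    rw [pv_join_nil_flatten]
    simp
  · have hne : m ≠ [] := hpre.resolve_left hflag
    have hsw : PySem.Chars.startswith m ['\\','\\','.'] = false :=
      Bool.eq_false_iff.mpr (fun h => hflag (hbridge.mp h))
    rw [if_neg hflag]
    simp only [hsw, Bool.false_eq_true, if_false]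
    rw [PySem.List.foldl_append_singleton_eq_map]
    rw [pv_passes_eq _ hdm]
    simp only [List.nil_append]
    clear_value m
    obtain ⟨c, cs, rfl⟩ := List.exists_cons_of_ne_nil hne
    exact pv_post c cs

-- ===== VERDICT (by name: the statement is the Claim_ definition above) =====
theorem arnPathFragment_from_path_spec : Claim_equal_arnPathFragment_from_path := by
  intro s hdom hpre
  unfold Spec_arnPathFragment_from_path arnPathFragment_from_path arnPathFragment_from_path_alt
  have hd : ∀ c ∈ s.toList, pvDomChar c = true := by
    have := hdom
    unfold Dom_arnPathFragment_from_path pvDomStr at this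
    simpa [List.all_eq_true] using this
  exact congrArg String.ofList (pv_core_eq s.toList hd hpre.2.2)
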